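-- pv_equiv track=rewrite | github.com/watanabe0402/LLM_nurturing_game | LLM_nurturing_game/src/game/game_initialize.py | _extract_initial_state
-- ===== SOURCE A (Python) =====
-- def _extract_initial_state(lines):
--     initial_state_mode = False
--     for line in lines:
--         if '[Initial State]' in line:
--             initial_state_mode = True
--             continue
--         elif initial_state_mode and line.strip():
--             return line.strip()
--     return ""
-- ===== SOURCE B (Python) =====
-- def _extract_initial_state(lines):
--     # Backward dynamic programming: walk the lines right-to-left maintaining,
--     # for the suffix seen so far, the answer assuming the marker was already
--     # seen (t) and the answer assuming it was not (f); return f for the whole list.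
--     t = f = ""
--     for line in reversed(lines):
--         if '[Initial State]' in line:
--             f = t
--         elif line.strip():
--             t = line.strip()
--     return f
-- ===== Notes on version B (the rewrite author's own statement) =====
-- stated objective: alternative
-- what changed: Replaces A's forward flag-driven pass with a backward dynamic-programming pass that maintains, per suffix, the answer with and without the marker already seen, and returns the no-marker-yet answer.
import Mathlib
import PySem

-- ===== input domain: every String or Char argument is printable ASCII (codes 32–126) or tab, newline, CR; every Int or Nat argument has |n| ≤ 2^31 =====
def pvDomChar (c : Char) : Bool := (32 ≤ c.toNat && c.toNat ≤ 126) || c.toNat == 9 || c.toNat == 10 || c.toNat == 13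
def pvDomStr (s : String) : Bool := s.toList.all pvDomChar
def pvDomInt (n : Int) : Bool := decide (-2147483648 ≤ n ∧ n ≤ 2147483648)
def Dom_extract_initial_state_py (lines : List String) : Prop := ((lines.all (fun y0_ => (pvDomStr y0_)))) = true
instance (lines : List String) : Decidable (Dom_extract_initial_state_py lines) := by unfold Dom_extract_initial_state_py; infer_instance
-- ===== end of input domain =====

-- B replaces A's forward flag-driven pass with a backward DP pass keeping, per
-- suffix, the answer with/without the marker already seen; objective: alternative.


-- ===== PORT A =====
-- A's single forward pass with the 'initial_state_mode' flag.
def extractGoA : List String → Bool → String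
  | [], _ => ""
  | l :: ls, mode =>
    if PySem.Str.isIn "[Initial State]" l then extractGoA ls true
    else if mode = true ∧ PySem.Str.strip l ≠ "" then PySem.Str.strip l
    else extractGoA ls mode

def extract_initial_state_py (lines : List String) : String := extractGoA lines false

-- ===== PORT B =====
-- B's backward loop body: acc = (t, f) = (answer if marker already seen, answer if not).
def extractStepB (acc : String × String) (line : String) : String × String :=
  if PySem.Str.isIn "[Initial State]" line then (acc.1, acc.1)
  else if PySem.Str.strip line ≠ "" then (PySem.Str.strip line, acc.2)
  else acc

def extract_initial_state_py_alt (lines : List String) : String :=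
  (lines.reverse.foldl extractStepB ("", "")).2

-- ===== PRECONDITION & SPEC =====
def Spec_extract_initial_state_py (lines : List String) (out : String) : Prop := out = extract_initial_state_py_alt lines
instance (lines : List String) (out : String) : Decidable (Spec_extract_initial_state_py lines out) := by unfold Spec_extract_initial_state_py; infer_instance

-- ===== CLAIM (what is proved, stated in full; the proofs are below) =====
def Claim_equal_extract_initial_state_py : Prop := ∀ (lines : List String), Dom_extract_initial_state_py lines → Spec_extract_initial_state_py lines (extract_initial_state_py lines)

-- ===== LEMMAS AND PROOFS =====
-- B's backward fold computes, for each suffix, the pair (A under mode=true, A under mode=false).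
theorem foldr_pair (ls : List String) :
    ls.foldr (fun x acc => extractStepB acc x) ("", "") =
      (extractGoA ls true, extractGoA ls false) := by
  induction ls with
  | nil => rfl
  | cons l ls ih =>
    rw [List.foldr_cons, ih]
    simp only [extractStepB, extractGoA, true_and]
    split_ifs <;> first | rfl | tauto

-- ===== VERDICT (by name: the statement is the Claim_ definition above) =====
theorem extract_initial_state_py_spec : Claim_equal_extract_initial_state_py := by
  intro lines _
  unfold Spec_extract_initial_state_py extract_initial_state_py extract_initial_state_py_alt
  rw [List.foldl_reverse, foldr_pair]
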